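-- pv_equiv track=rewrite | github.com/haowern98/automation | src/utils/comparison.py | _clean_worksheet_name
-- ===== SOURCE A (Python) =====
-- def _clean_worksheet_name(name):
--     """
--     Clean worksheet name to ensure it's valid for Excel
--
--     Args:
--         name (str): Original worksheet name
--
--     Returns:
--         str: Cleaned worksheet name
--     """
--     if not name:
--         return "Sheet"
--
--     # Excel worksheet name restrictions:
--     # - Max 31 characters
--     # - Cannot contain: \ / ? * [ ] :
--     # - Cannot be empty
--     # - Cannot be "History" (reserved)
--
--     # Remove invalid characters
--     invalid_chars = ['\\', '/', '?', '*', '[', ']', ':']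
--     clean_name = name
--     for char in invalid_chars:
--         clean_name = clean_name.replace(char, '_')
--
--     # Trim to 31 characters
--     if len(clean_name) > 31:
--         clean_name = clean_name[:31]
--
--     # Ensure it's not empty
--     if not clean_name.strip():
--         clean_name = "Sheet"
--
--     # Avoid reserved name
--     if clean_name.lower() == "history":
--         clean_name = "Report_History"
--
--     return clean_name.strip()
-- ===== SOURCE B (Python) =====
-- def _clean_worksheet_name(name):
--     if not name:
--         return "Sheet"
--     invalid = frozenset('\\/?*[]:')
--     cleaned = ''.join('_' if c in invalid else c for c in name)[:31]
--     if not cleaned.strip():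
--         cleaned = "Sheet"
--     return "Report_History" if cleaned.lower() == "history" else cleaned.strip()
-- ===== Notes on version B (the rewrite author's own statement) =====
-- stated objective: simpler
-- what changed: Replaces the loop of seven full-string .replace passes with a single character-wise pass that rebuilds the string using a frozenset membership test, and folds the unconditional [:31] slice and the reserved-name/strip returns into one expression.
import Mathlib
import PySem

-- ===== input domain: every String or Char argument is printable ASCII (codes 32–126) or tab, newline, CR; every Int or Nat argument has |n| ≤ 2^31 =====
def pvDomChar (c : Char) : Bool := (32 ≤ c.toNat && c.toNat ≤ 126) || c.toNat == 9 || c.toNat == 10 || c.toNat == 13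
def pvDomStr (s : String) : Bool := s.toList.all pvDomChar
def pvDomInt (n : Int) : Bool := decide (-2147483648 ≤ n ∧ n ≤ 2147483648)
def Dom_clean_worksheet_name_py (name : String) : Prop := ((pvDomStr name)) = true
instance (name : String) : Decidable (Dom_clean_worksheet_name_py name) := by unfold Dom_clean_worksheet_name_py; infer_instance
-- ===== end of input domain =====

-- B replaces A's seven repeated full-string .replace scans by one single-pass
-- rebuild of the string with a frozenset membership test (objective: simpler).

-- ===== PORT A =====
def clean_worksheet_name_py (name : String) : String :=
  if name = "" then "Sheet"
  else
    let invalid_chars : List String := ["\\", "/", "?", "*", "[", "]", ":"]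
    let clean_name := invalid_chars.foldl (fun s ch => PySem.Str.replace s ch "_") name
    let clean_name := if PySem.Str.len clean_name > 31 then PySem.Str.slice clean_name none (some 31) else clean_name
    let clean_name := if PySem.Str.strip clean_name = "" then "Sheet" else clean_name
    let clean_name := if PySem.Str.lower clean_name = "history" then "Report_History" else clean_name
    PySem.Str.strip clean_name

-- ===== PORT B =====
def clean_worksheet_name_py_alt (name : String) : String :=
  if name = "" then "Sheet"
  else
    let invalid : PySem.Set Char := PySem.Set.ofList ['\\', '/', '?', '*', '[', ']', ':']
    let cleaned := String.ofList ((name.toList.map (fun c => if invalid.contains c then '_' else c)).take 31)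
    let cleaned := if PySem.Str.strip cleaned = "" then "Sheet" else cleaned
    if PySem.Str.lower cleaned = "history" then "Report_History" else PySem.Str.strip cleaned

-- ===== PRECONDITION & SPEC =====
def Spec_clean_worksheet_name_py (name : String) (out : String) : Prop := out = clean_worksheet_name_py_alt name
instance (name : String) (out : String) : Decidable (Spec_clean_worksheet_name_py name out) := by unfold Spec_clean_worksheet_name_py; infer_instance

-- ===== CLAIM (what is proved, stated in full; the proofs are below) =====
def Claim_equal_clean_worksheet_name_py : Prop := ∀ (name : String), Dom_clean_worksheet_name_py name → Spec_clean_worksheet_name_py name (clean_worksheet_name_py name)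

-- ===== LEMMAS AND PROOFS =====

-- Chars.replace with a single-character pattern is a pointwise map.
lemma go_single (c r : Char) : ∀ (fuel : Nat) (l acc : List Char), l.length ≤ fuel →
    PySem.Chars.replace.go [c] [r] fuel l acc
      = acc.reverse ++ l.map (fun x => if x = c then r else x) := by
  intro fuel
  induction fuel with
  | zero =>
    intro l acc h
    cases l with
    | nil => simp [PySem.Chars.replace.go]
    | cons x t => simp at h
  | succ n ih =>
    intro l acc h
    cases l with
    | nil => simp [PySem.Chars.replace.go]
    | cons x t =>
      simp only [PySem.Chars.replace.go]
      by_cases hx : x = c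
      · subst hx
        simp [List.isPrefixOf, ih t _ (by simpa using h)]
      · simp [List.isPrefixOf, hx, ih t _ (by simpa using h)]
        intro h'; exact absurd h'.symm hx

lemma replace_single (c r : Char) (l : List Char) :
    PySem.Chars.replace l [c] [r] = l.map (fun x => if x = c then r else x) := by
  simp [PySem.Chars.replace, go_single c r l.length l [] le_rfl]

-- The seven chained single-character replacements act pointwise like B's set test.
lemma point_eq (x : Char) :
    (fun y => if y = ':' then '_' else y)
      ((fun y => if y = ']' then '_' else y)
        ((fun y => if y = '[' then '_' else y)
          ((fun y => if y = '*' then '_' else y)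
            ((fun y => if y = '?' then '_' else y)
              ((fun y => if y = '/' then '_' else y)
                ((fun y => if y = '\\' then '_' else y) x))))))
      = (if (PySem.Set.ofList ['\\', '/', '?', '*', '[', ']', ':']).contains x then '_' else x) := by
  by_cases hx : x ∈ ['\\', '/', '?', '*', '[', ']', ':']
  · fin_cases hx <;> rfl
  · simp at hx
    obtain ⟨h1, h2, h3, h4, h5, h6, h7⟩ := hx
    simp [h1, h2, h3, h4, h5, h6, h7, PySem.Set.ofList, PySem.Set.contains, PySem.Set.add]

-- The seven successive maps collapse to B's single map.
lemma chain_map : ∀ l : List Char,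
    ((((((l.map (fun y => if y = '\\' then '_' else y)).map (fun y => if y = '/' then '_' else y)).map
        (fun y => if y = '?' then '_' else y)).map (fun y => if y = '*' then '_' else y)).map
        (fun y => if y = '[' then '_' else y)).map (fun y => if y = ']' then '_' else y)).map
        (fun y => if y = ':' then '_' else y)
      = l.map (fun c => if (PySem.Set.ofList ['\\', '/', '?', '*', '[', ']', ':']).contains c then '_' else c) := by
  intro l
  induction l with
  | nil => rfl
  | cons x t ih =>
    simp only [List.map_cons]
    exact congrArg₂ List.cons (point_eq x) ih

-- A's fold of replaces equals B's single map, on the character lists.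
lemma fold_eq_map (s : String) :
    ((["\\", "/", "?", "*", "[", "]", ":"] : List String).foldl
        (fun t ch => PySem.Str.replace t ch "_") s).toList
      = s.toList.map
          (fun c => if (PySem.Set.ofList ['\\', '/', '?', '*', '[', ']', ':']).contains c then '_' else c) := by
  simp only [List.foldl, PySem.Str.toList_replace]
  simp only [show ("\\" : String).toList = ['\\'] from by decide,
    show ("/" : String).toList = ['/'] from by decide,
    show ("?" : String).toList = ['?'] from by decide,
    show ("*" : String).toList = ['*'] from by decide,
    show ("[" : String).toList = ['['] from by decide,
    show ("]" : String).toList = [']'] from by decide,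
    show (":" : String).toList = [':'] from by decide,
    show ("_" : String).toList = ['_'] from by decide]
  simp only [replace_single]
  exact chain_map s.toList

-- A's conditional trim produces exactly B's unconditional take 31.
lemma trim_toList (s : String) :
    (if PySem.Str.len s > 31 then PySem.Str.slice s none (some 31) else s).toList
      = s.toList.take 31 := by
  by_cases h : PySem.Str.len s > 31
  · rw [if_pos h, PySem.Str.toList_slice, PySem.Chars.slice_eq_listSlice,
      PySem.List.slice_to s.toList (by omega : (0:Int) ≤ 31)]
    rfl
  · rw [if_neg h]
    rw [PySem.Str.len_eq] at h
    exact (List.take_of_length_le (by omega)).symm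

-- ===== VERDICT (by name: the statement is the Claim_ definition above) =====
theorem clean_worksheet_name_py_spec : Claim_equal_clean_worksheet_name_py := by
  intro name _
  unfold Spec_clean_worksheet_name_py clean_worksheet_name_py clean_worksheet_name_py_alt
  by_cases hn : name = ""
  · simp [hn]
  · simp only [hn, if_false]
    have hkey :
        (if PySem.Str.len ((["\\", "/", "?", "*", "[", "]", ":"] : List String).foldl
              (fun t ch => PySem.Str.replace t ch "_") name) > 31
          then PySem.Str.slice ((["\\", "/", "?", "*", "[", "]", ":"] : List String).foldl
              (fun t ch => PySem.Str.replace t ch "_") name) none (some 31)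
          else (["\\", "/", "?", "*", "[", "]", ":"] : List String).foldl
              (fun t ch => PySem.Str.replace t ch "_") name)
          = String.ofList ((name.toList.map
              (fun c => if (PySem.Set.ofList ['\\', '/', '?', '*', '[', ']', ':']).contains c then '_' else c)).take 31) := by
      apply String.toList_inj.mp
      rw [trim_toList, fold_eq_map, String.toList_ofList]
    rw [hkey]
    by_cases hh : PySem.Str.lower (if PySem.Str.strip (String.ofList ((name.toList.map
        (fun c => if (PySem.Set.ofList ['\\', '/', '?', '*', '[', ']', ':']).contains c then '_' else c)).take 31)) = ""
        then "Sheet"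
        else String.ofList ((name.toList.map
          (fun c => if (PySem.Set.ofList ['\\', '/', '?', '*', '[', ']', ':']).contains c then '_' else c)).take 31)) = "history"
    · rw [if_pos hh, if_pos hh]
      decide
    · rw [if_neg hh, if_neg hh]
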